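-- pv_equiv track=rewrite | github.com/huynhngoc/head-neck-analysis | gen_2d_3d.py | get_slice_idx
-- ===== SOURCE A (Python) =====
-- def get_slice_idx(patients):
--     idx = [0]
--     for i, pid in enumerate(patients[1:]):
--         if pid == patients[i]:
--             idx.append(idx[-1] + 1)
--         else:
--             idx.append(0)
--     return idx
-- ===== SOURCE B (Python) =====
-- def get_slice_idx(patients):
--     # Run-grouping: split into maximal runs of consecutive equal ids,
--     # emit 0..L-1 for each run of length L.
--     out = []
--     i = 0
--     n = len(patients)
--     while i < n:
--         j = i
--         while j < n and patients[j] == patients[i]: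
--             j += 1
--         out.extend(range(j - i))
--         i = j
--     return out
-- ===== Notes on version B (the rewrite author's own statement) =====
-- stated objective: idiomatic
-- what changed: Replaces the neighbor-comparison loop that appends previous-counter-plus-one or zero with a run-grouping traversal that finds each maximal run of consecutive equal ids and emits range(run_length) for it.
-- intended difference: On the empty input A returns the single-element list containing zero (a leftover of the seed value placed in idx before the loop), while B returns the empty list, which is the intended slice-index list for zero slices. — e.g. on get_slice_idx([]): A returns [0], B returns []
import Mathlib
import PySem

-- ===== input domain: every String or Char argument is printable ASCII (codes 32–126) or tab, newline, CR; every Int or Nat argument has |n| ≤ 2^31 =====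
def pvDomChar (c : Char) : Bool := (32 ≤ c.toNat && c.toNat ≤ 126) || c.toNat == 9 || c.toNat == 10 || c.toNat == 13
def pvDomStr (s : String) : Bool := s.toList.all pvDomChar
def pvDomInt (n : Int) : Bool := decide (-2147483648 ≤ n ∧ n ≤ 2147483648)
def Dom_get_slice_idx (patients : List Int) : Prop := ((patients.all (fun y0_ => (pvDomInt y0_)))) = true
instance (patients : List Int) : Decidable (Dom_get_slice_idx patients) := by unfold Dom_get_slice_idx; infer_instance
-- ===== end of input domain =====

-- B replaces A's neighbor-comparison-and-append loop with a run-grouping traversal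
-- (idiomatic); on the empty input A returns [0] while B returns [] (see D_ below).


-- ===== PORT A =====
-- loop body: for i, pid in enumerate(patients[1:]): if pid == patients[i]: append idx[-1]+1 else append 0
def pvALoop (patients : List Int) : Nat → List Int → List Int → List Int
  | _, idx, [] => idx
  | i, idx, pid :: rest =>
    if some pid = PySem.List.pyGet? patients (i : Int)
    then pvALoop patients (i + 1) (idx ++ [PySem.List.pyGetD idx (-1) 0 + 1]) rest
    else pvALoop patients (i + 1) (idx ++ [0]) rest

def get_slice_idx (patients : List Int) : List Int :=
  pvALoop patients 0 [0] (PySem.List.slice patients (some 1) none)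

-- ===== PORT B =====
-- inner while loop: the length of the maximal run of ids equal to the run's first id
def pvRuns : List Int → List Nat
  | [] => []
  | x :: xs => (1 + (xs.takeWhile (· == x)).length) :: pvRuns (xs.dropWhile (· == x))
  termination_by l => l.length
  decreasing_by
    exact Nat.lt_succ_of_le (List.length_dropWhile_le _ _)

-- out.extend(range(L)) for each run length L
def get_slice_idx_alt (patients : List Int) : List Int :=
  (pvRuns patients).flatMap (fun L => (List.range L).map (fun (k : Nat) => (k : Int)))

-- ===== PRECONDITION & SPEC =====
-- On the empty input A returns the single-element list containing zero (a leftover of the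
-- seed value placed in idx before the loop) while B returns the empty list, the intended
-- slice-index list for zero slices.
def D_get_slice_idx (patients : List Int) : Prop := patients = []
instance (patients : List Int) : Decidable (D_get_slice_idx patients) := by unfold D_get_slice_idx; infer_instance

def Spec_get_slice_idx (patients : List Int) (out : List Int) : Prop :=
  ¬ D_get_slice_idx patients → out = get_slice_idx_alt patients
instance (patients : List Int) (out : List Int) : Decidable (Spec_get_slice_idx patients out) := by unfold Spec_get_slice_idx; infer_instance

def pvDiffWitness_get_slice_idx : List Int := []
def pvDiffWitnessOut_get_slice_idx : (List Int) × (List Int) := ([0], [])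

-- ===== CLAIM (what is proved, stated in full; the proofs are below) =====
def Claim_unchanged_get_slice_idx : Prop := ∀ (patients : List Int), Dom_get_slice_idx patients → Spec_get_slice_idx patients (get_slice_idx patients)
def Claim_changed_get_slice_idx : Prop := Dom_get_slice_idx (pvDiffWitness_get_slice_idx) ∧ D_get_slice_idx (pvDiffWitness_get_slice_idx) ∧ get_slice_idx (pvDiffWitness_get_slice_idx) = pvDiffWitnessOut_get_slice_idx.1 ∧ get_slice_idx_alt (pvDiffWitness_get_slice_idx) = pvDiffWitnessOut_get_slice_idx.2 ∧ pvDiffWitnessOut_get_slice_idx.1 ≠ pvDiffWitnessOut_get_slice_idx.2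
def Claim_exact_get_slice_idx : Prop := ∀ (patients : List Int), Dom_get_slice_idx patients → D_get_slice_idx patients → get_slice_idx patients ≠ get_slice_idx_alt patients

-- ===== LEMMAS AND PROOFS =====

-- the common shape of both programs' output after the first element of a run:
-- counts c+1, c+2, … while the id repeats, restarts at 0 on a change
def pvG (x c : Int) : List Int → List Int
  | [] => []
  | y :: ys => if y = x then (c + 1) :: pvG y (c + 1) ys else (0 : Int) :: pvG y 0 ys

def pvStart : List Int → List Int
  | [] => []
  | y :: ys => 0 :: pvG y 0 ys

theorem pvALoop_eq_pvG (xs : List Int) : ∀ (patients : List Int) (k : Nat) (x : Int)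
    (acc : List Int) (c : Int), patients.drop k = x :: xs →
    pvALoop patients k (acc ++ [c]) xs = acc ++ [c] ++ pvG x c xs := by
  induction xs with
  | nil => intro patients k x acc c h; simp [pvALoop, pvG]
  | cons pid rest ih =>
    intro patients k x acc c h
    have hget : PySem.List.pyGet? patients (k : Int) = some x := by
      rw [PySem.List.pyGet?_natCast]
      have : patients[k]? = (patients.drop k)[0]? := by
        simp [List.getElem?_drop]
      rw [this, h]; rfl
    have hdrop : patients.drop (k + 1) = pid :: rest := by
      have : patients.drop (k + 1) = (patients.drop k).drop 1 := by
        rw [List.drop_drop]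
      rw [this, h]; rfl
    by_cases hx : pid = x
    · subst hx
      rw [pvALoop, if_pos (by rw [hget]), PySem.List.pyGetD_neg_one_append_singleton]
      have := ih patients (k + 1) pid (acc ++ [c]) (c + 1) hdrop
      simp only [List.append_assoc] at this ⊢
      rw [this, pvG, if_pos rfl]
      simp
    · rw [pvALoop, if_neg (by rw [hget]; simp [hx])]
      have := ih patients (k + 1) pid (acc ++ [c]) 0 hdrop
      simp only [List.append_assoc] at this ⊢
      rw [this, pvG, if_neg hx]
      simp

theorem pvMapShift (c : Int) (m : Nat) :
    (List.range (m + 1)).map (fun (k : Nat) => c + 1 + (k : Int))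
      = (c + 1) :: (List.range m).map (fun (k : Nat) => c + 1 + 1 + (k : Int)) := by
  rw [List.range_succ_eq_map, List.map_cons, List.map_map]
  refine congrArg₂ _ (by norm_num) (List.map_congr_left ?_)
  intro k _
  show c + 1 + ((k + 1 : Nat) : Int) = c + 1 + 1 + (k : Int)
  push_cast; ring

theorem pvG_run (xs : List Int) : ∀ (x c : Int),
    pvG x c xs = (List.range (xs.takeWhile (· == x)).length).map (fun (k : Nat) => c + 1 + (k : Int))
      ++ pvStart (xs.dropWhile (· == x)) := by
  induction xs with
  | nil => intro x c; simp [pvG, pvStart]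
  | cons y ys ih =>
    intro x c
    by_cases hx : y = x
    · subst hx
      rw [pvG, if_pos rfl, List.takeWhile_cons_of_pos (by simp),
        List.dropWhile_cons_of_pos (by simp), List.length_cons, pvMapShift,
        ih y (c + 1), List.cons_append]
    · rw [pvG, if_neg hx, List.takeWhile_cons_of_neg (by simp [hx]),
        List.dropWhile_cons_of_neg (by simp [hx])]
      simp [pvStart]

theorem pvMapZero (m : Nat) :
    (List.range (1 + m)).map (fun (k : Nat) => (k : Int))
      = 0 :: (List.range m).map (fun (k : Nat) => (0 : Int) + 1 + (k : Int)) := by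
  rw [Nat.add_comm, List.range_succ_eq_map, List.map_cons, List.map_map]
  refine congrArg₂ _ (by norm_num) (List.map_congr_left ?_)
  intro k _
  show ((k + 1 : Nat) : Int) = 0 + 1 + (k : Int)
  push_cast; ring

theorem alt_eq_pvStart (l : List Int) : get_slice_idx_alt l = pvStart l := by
  induction hn : l.length using Nat.strong_induction_on generalizing l with
  | _ n ih =>
    match l with
    | [] => simp [get_slice_idx_alt, pvRuns, pvStart]
    | x :: xs =>
      rw [get_slice_idx_alt, pvRuns, List.flatMap_cons]
      have hrec : (pvRuns (xs.dropWhile (· == x))).flatMap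
          (fun L => (List.range L).map (fun (k : Nat) => (k : Int)))
          = get_slice_idx_alt (xs.dropWhile (· == x)) := rfl
      have hlen : (xs.dropWhile (· == x)).length < n := by
        subst hn
        exact Nat.lt_succ_of_le (List.length_dropWhile_le _ _)
      rw [hrec, ih _ hlen _ rfl, pvStart, pvG_run, pvMapZero, List.cons_append]

-- ===== VERDICT (by name: the statement is the Claim_ definition above) =====
theorem get_slice_idx_spec : Claim_unchanged_get_slice_idx := by
  intro patients _ hD
  match patients, hD with
  | x :: xs, _ =>
    rw [get_slice_idx, PySem.List.slice_from_one, List.tail_cons]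
    have := pvALoop_eq_pvG xs (x :: xs) 0 x [] 0 (by simp)
    simp only [List.nil_append] at this
    rw [this, alt_eq_pvStart, pvStart]
    rfl

theorem get_slice_idx_changed : Claim_changed_get_slice_idx := by
  unfold Claim_changed_get_slice_idx
  refine ⟨by decide, rfl, by decide, ?_, by decide⟩
  simp [get_slice_idx_alt, pvRuns, pvDiffWitness_get_slice_idx, pvDiffWitnessOut_get_slice_idx]

theorem get_slice_idx_tight : Claim_exact_get_slice_idx := by
  intro patients _ hD
  unfold D_get_slice_idx at hD
  subst hD
  have hB : get_slice_idx_alt [] = [] := by simp [get_slice_idx_alt, pvRuns]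
  have hA : get_slice_idx [] = [0] := by decide
  rw [hA, hB]; decide
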